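-- pv_equiv track=rewrite | github.com/MitchellQuinn/bounded-monocular-perception | 05_inference-v0.3/src/inference_v0_1/pipeline.py | _json_array_bounds
-- ===== SOURCE A (Python) =====
-- def _json_array_bounds(content: str) -> tuple[int, int, bool]:
--     first_index = next((index for index, char in enumerate(content) if not char.isspace()), -1)
--     last_index = next(
--         (
--             len(content) - 1 - index
--             for index, char in enumerate(reversed(content))
--             if not char.isspace()
--         ),
--         -1,
--     )
--     if first_index < 0 or last_index < 0:
--         return -1, -1, False
--     if content[first_index] != "[" or content[last_index] != "]":
--         raise ValueError("JSON output must be an array before batched append.")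
--     has_items = bool(content[first_index + 1 : last_index].strip())
--     return first_index, last_index, has_items
-- ===== SOURCE B (Python) =====
-- def _json_array_bounds(content: str) -> tuple[int, int, bool]:
--     first = last = -1
--     count = 0
--     for i, ch in enumerate(content):
--         if not ch.isspace():
--             if first < 0:
--                 first = i
--             last = i
--             count += 1
--     if count == 0:
--         return -1, -1, False
--     if content[first] != "[" or content[last] != "]":
--         raise ValueError("JSON output must be an array before batched append.")
--     return first, last, count >= 3
-- ===== Notes on version B (the rewrite author's own statement) =====
-- stated objective: alternative
-- what changed: B replaces A's two staged scans (a forward enumerate and a scan over reversed(content)) plus a slice-and-strip test by one single pass with an accumulator that tracks the first and last non-whitespace index and counts non-whitespace characters, deriving has_items as count >= 3 instead of stripping the interior slice.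
import Mathlib
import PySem

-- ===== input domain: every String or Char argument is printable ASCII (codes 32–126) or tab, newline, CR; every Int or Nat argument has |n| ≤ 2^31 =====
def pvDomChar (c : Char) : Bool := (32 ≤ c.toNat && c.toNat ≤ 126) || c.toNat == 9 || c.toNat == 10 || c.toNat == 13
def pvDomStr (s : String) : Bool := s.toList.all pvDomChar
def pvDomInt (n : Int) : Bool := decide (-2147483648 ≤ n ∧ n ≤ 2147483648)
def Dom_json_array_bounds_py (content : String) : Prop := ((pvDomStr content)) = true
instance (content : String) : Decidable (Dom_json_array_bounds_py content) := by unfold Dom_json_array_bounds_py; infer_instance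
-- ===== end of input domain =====

-- B replaces A's two staged scans (forward and over reversed(content)) plus the
-- slice-and-strip interior test by ONE pass with an accumulator (first, last, count),
-- deriving has_items as count >= 3 (objective: alternative decomposition, same cost).

-- ===== PORT A =====
-- next((index for index, char in enumerate(content) if not char.isspace()), -1)
def pvScanFwd : List Char → Nat → Int
  | [], _ => -1
  | c :: rest, i => if !(PySem.Chars.isspace c) then (i : Int) else pvScanFwd rest (i + 1)

-- next((len(content) - 1 - index for index, char in enumerate(reversed(content)) if not char.isspace()), -1)
def pvScanRev (n : Nat) : List Char → Nat → Int
  | [], _ => -1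
  | c :: rest, j => if !(PySem.Chars.isspace c) then (n : Int) - 1 - (j : Int) else pvScanRev n rest (j + 1)

def json_array_bounds_py (content : String) : Int × Int × Bool :=
  let cs := content.toList
  let first_index := pvScanFwd cs 0
  let last_index := pvScanRev cs.length cs.reverse 0
  if first_index < 0 ∨ last_index < 0 then (-1, -1, false)
  else if PySem.List.pyGetD cs first_index ' ' ≠ '[' ∨ PySem.List.pyGetD cs last_index ' ' ≠ ']' then
    (-1, -1, false)  -- Python raises ValueError here; excluded by Pre_
  else
    (first_index, last_index,
      !(PySem.Chars.strip (PySem.List.slice cs (some (first_index + 1)) (some last_index))).isEmpty)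

-- ===== PORT B =====
-- the single loop: state (first, last, count), index i
def pvScanB : List Char → Nat → Int × Int × Nat → Int × Int × Nat
  | [], _, st => st
  | c :: rest, i, (f, l, cnt) =>
    if !(PySem.Chars.isspace c) then
      pvScanB rest (i + 1) ((if f < 0 then (i : Int) else f), (i : Int), cnt + 1)
    else
      pvScanB rest (i + 1) (f, l, cnt)

def json_array_bounds_py_alt (content : String) : Int × Int × Bool :=
  let cs := content.toList
  let st := pvScanB cs 0 (-1, -1, 0)
  if st.2.2 = 0 then (-1, -1, false)
  else if PySem.List.pyGetD cs st.1 ' ' ≠ '[' ∨ PySem.List.pyGetD cs st.2.1 ' ' ≠ ']' then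
    (-1, -1, false)  -- Python raises ValueError here; excluded by Pre_
  else
    (st.1, st.2.1, decide (3 ≤ st.2.2))

-- ===== PRECONDITION & SPEC =====
-- Pre_ excludes exactly the inputs on which A raises ValueError (content with some
-- non-whitespace but whose stripped form is not bracketed as a JSON array); B raises
-- the same ValueError there.
def Pre_json_array_bounds_py (content : String) : Prop :=
  PySem.Chars.strip content.toList = [] ∨
    ((PySem.Chars.strip content.toList).head? = some '[' ∧
     (PySem.Chars.strip content.toList).getLast? = some ']')
instance (content : String) : Decidable (Pre_json_array_bounds_py content) := by
  unfold Pre_json_array_bounds_py; infer_instance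

def pvWitness_json_array_bounds_py : String := " [1, 2] "

def Spec_json_array_bounds_py (content : String) (out : Int × Int × Bool) : Prop :=
  out = json_array_bounds_py_alt content
instance (content : String) (out : Int × Int × Bool) : Decidable (Spec_json_array_bounds_py content out) := by
  unfold Spec_json_array_bounds_py; infer_instance

-- ===== CLAIM (what is proved, stated in full; the proofs are below) =====
def Claim_equal_json_array_bounds_py : Prop :=
  ∀ (content : String), Dom_json_array_bounds_py content → Pre_json_array_bounds_py content →
    Spec_json_array_bounds_py content (json_array_bounds_py content)

-- ===== LEMMAS AND PROOFS =====

theorem pvScanFwd_eq (cs : List Char) (i : Nat) :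
    pvScanFwd cs i =
      if (List.dropWhile PySem.Chars.isspace cs) = [] then -1
      else (i : Int) + ((List.takeWhile PySem.Chars.isspace cs).length : Int) := by
  induction cs generalizing i with
  | nil => simp [pvScanFwd]
  | cons c rest ih =>
    by_cases h : PySem.Chars.isspace c
    · simp [pvScanFwd, h, ih]
      split_ifs
      push_cast
      ring
    · simp [pvScanFwd, h]

theorem pvScanRev_eq (n : Nat) (cs : List Char) (j : Nat) :
    pvScanRev n cs j =
      if (List.dropWhile PySem.Chars.isspace cs) = [] then -1
      else (n : Int) - 1 - ((j : Nat) + (List.takeWhile PySem.Chars.isspace cs).length : Int) := by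
  induction cs generalizing j with
  | nil => simp [pvScanRev]
  | cons c rest ih =>
    by_cases h : PySem.Chars.isspace c
    · simp [pvScanRev, h, ih]
      split_ifs
      push_cast
      ring
    · simp [pvScanRev, h]

-- decomposition: cs = la ++ t ++ tr, with t = strip cs
theorem pv_decomp (cs : List Char) :
    cs = List.takeWhile PySem.Chars.isspace cs ++ PySem.Chars.strip cs ++
         (List.takeWhile PySem.Chars.isspace (List.dropWhile PySem.Chars.isspace cs).reverse).reverse := by
  conv_lhs => rw [← List.takeWhile_append_dropWhile (p := PySem.Chars.isspace) (l := cs)]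
  rw [List.append_assoc]
  congr 1
  conv_lhs => rw [← List.reverse_reverse (List.dropWhile PySem.Chars.isspace cs),
    ← List.takeWhile_append_dropWhile (p := PySem.Chars.isspace)
        (l := (List.dropWhile PySem.Chars.isspace cs).reverse)]
  rw [List.reverse_append]
  rfl

theorem pv_all_space (cs : List Char) :
    (∀ x ∈ cs, PySem.Chars.isspace x = true) ↔ PySem.Chars.strip cs = [] := by
  unfold PySem.Chars.strip PySem.Chars.rstrip PySem.Chars.lstrip
  simp [List.dropWhile_eq_nil_iff]
  constructor
  · intro h x hx
    exact h x ((List.dropWhile_sublist _).subset hx)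
  · intro h x hx
    by_contra hns
    have h1 : List.dropWhile PySem.Chars.isspace cs ≠ [] := by
      simp [List.dropWhile_eq_nil_iff]; exact ⟨x, hx, by simpa using hns⟩
    obtain ⟨hd, tl, hdt⟩ := List.exists_cons_of_ne_nil h1
    have hhd : PySem.Chars.isspace hd = false := by
      have := List.head_dropWhile_not (p := PySem.Chars.isspace) (l := cs) h1
      simpa [hdt] using this
    have : PySem.Chars.isspace hd = true := h hd (by simp [hdt])
    simp [hhd] at this

theorem pv_strip_nil_iff (cs : List Char) :
    List.dropWhile PySem.Chars.isspace cs = [] ↔ PySem.Chars.strip cs = [] := by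
  rw [List.dropWhile_eq_nil_iff, pv_all_space]

-- pvScanB over an append is the composition of the two scans
theorem pvScanB_append (xs ys : List Char) (i : Nat) (st : Int × Int × Nat) :
    pvScanB (xs ++ ys) i st = pvScanB ys (i + xs.length) (pvScanB xs i st) := by
  induction xs generalizing i st with
  | nil => simp [pvScanB]
  | cons c rest ih =>
    obtain ⟨f, l, cnt⟩ := st
    by_cases h : PySem.Chars.isspace c <;>
      simp [pvScanB, h, ih, Nat.add_comm, Nat.add_left_comm]

-- all-whitespace input leaves the state unchanged
theorem pvScanB_all_space (xs : List Char) (i : Nat) (st : Int × Int × Nat)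
    (h : ∀ x ∈ xs, PySem.Chars.isspace x = true) : pvScanB xs i st = st := by
  induction xs generalizing i with
  | nil => simp [pvScanB]
  | cons c rest ih =>
    obtain ⟨f, l, cnt⟩ := st
    have hc : PySem.Chars.isspace c = true := h c (by simp)
    simp [pvScanB, hc]
    exact ih _ (fun x hx => h x (by simp [hx]))

-- the first component never changes once it is nonnegative
theorem pvScanB_first_stable (xs : List Char) (i : Nat) (f l : Int) (cnt : Nat)
    (hf : 0 ≤ f) : (pvScanB xs i (f, l, cnt)).1 = f := by
  induction xs generalizing i l cnt with
  | nil => simp [pvScanB]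
  | cons c rest ih =>
    by_cases h : PySem.Chars.isspace c
    · simp [pvScanB, h, ih]
    · simp [pvScanB, h, if_neg (by omega : ¬ f < 0), ih]

-- a one-element scan on a non-whitespace character
theorem pvScanB_singleton (c : Char) (i : Nat) (st : Int × Int × Nat)
    (h : PySem.Chars.isspace c = false) :
    pvScanB [c] i st = ((if st.1 < 0 then (i : Int) else st.1), (i : Int), st.2.2 + 1) := by
  obtain ⟨f, l, cnt⟩ := st
  simp [pvScanB, h]

-- the count accumulates the number of non-whitespace characters
theorem pvScanB_count (xs : List Char) (i : Nat) (st : Int × Int × Nat) :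
    (pvScanB xs i st).2.2 = st.2.2 + (xs.filter (fun x => !PySem.Chars.isspace x)).length := by
  induction xs generalizing i st with
  | nil => simp [pvScanB]
  | cons c rest ih =>
    obtain ⟨f, l, cnt⟩ := st
    by_cases h : PySem.Chars.isspace c <;>
      simp [pvScanB, h, ih] <;> omega

-- ===== VERDICT (by name: the statement is the Claim_ definition above) =====
theorem json_array_bounds_py_spec : Claim_equal_json_array_bounds_py := by
  intro content _ hpre
  unfold Spec_json_array_bounds_py json_array_bounds_py json_array_bounds_py_alt
  set cs := content.toList with hcs
  by_cases ht : PySem.Chars.strip cs = []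
  · have h1 : List.dropWhile PySem.Chars.isspace cs = [] := (pv_strip_nil_iff cs).mpr ht
    have hall : ∀ x ∈ cs, PySem.Chars.isspace x = true := (pv_all_space cs).mpr ht
    simp [pvScanFwd_eq, h1, pvScanB_all_space cs 0 _ hall]
  · obtain ⟨hhead, hlast⟩ := hpre.resolve_left ht
    set t := PySem.Chars.strip cs with htdef
    set la := List.takeWhile PySem.Chars.isspace cs with hladef
    set tr := (List.takeWhile PySem.Chars.isspace
        (List.dropWhile PySem.Chars.isspace cs).reverse).reverse with htrdef
    have hcs2 : cs = la ++ t ++ tr := pv_decomp cs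
    -- t = '[' :: mid ++ [']']
    obtain ⟨hb, t', ht'⟩ := List.exists_cons_of_ne_nil ht
    have hhb : hb = '[' := by
      rw [ht'] at hhead; simpa using hhead
    have ht'ne : t' ≠ [] := by
      intro hx
      rw [ht', hx] at hhead hlast
      simp at hhead hlast
      rw [hhead] at hlast; exact absurd hlast (by decide)
    set mid := t'.dropLast with hmiddef
    have hmid : t' = mid ++ [t'.getLast ht'ne] := (List.dropLast_append_getLast ht'ne).symm
    have heb : t'.getLast ht'ne = ']' := by
      rw [ht'] at hlast
      rw [List.getLast?_cons, List.getLast?_eq_some_getLast ht'ne] at hlast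
      simpa using hlast
    have htfull : t = '[' :: (mid ++ [']']) := by rw [ht', hmid, hhb, heb]
    have hlaws : ∀ x ∈ la, PySem.Chars.isspace x = true := by
      intro x hx; exact List.mem_takeWhile_imp hx
    have htrws : ∀ x ∈ tr, PySem.Chars.isspace x = true := by
      intro x hx; rw [htrdef, List.mem_reverse] at hx; exact List.mem_takeWhile_imp hx
    have hLnil : List.dropWhile PySem.Chars.isspace cs ≠ [] :=
      fun hx => ht ((pv_strip_nil_iff cs).mp hx)
    have hlen : cs.length = la.length + t.length + tr.length := by
      rw [hcs2]; simp; ring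
    have htlen : t.length = mid.length + 2 := by rw [htfull]; simp
    -- ===== A side =====
    have hfwd : pvScanFwd cs 0 = ((la.length : Nat) : Int) := by
      rw [pvScanFwd_eq, if_neg hLnil, ← hladef]; ring
    have htwr : (List.takeWhile PySem.Chars.isspace cs.reverse).length = tr.length := by
      have h3 : cs.reverse = tr.reverse ++ (t.reverse ++ la.reverse) := by
        rw [hcs2]; simp
      have htrall : List.takeWhile PySem.Chars.isspace tr.reverse = tr.reverse :=
        List.takeWhile_eq_self_iff.mpr (fun x hx => htrws x (List.mem_reverse.mp hx))
      rw [h3, List.takeWhile_append, if_pos (by rw [htrall])]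
      have h4 : List.takeWhile PySem.Chars.isspace (t.reverse ++ la.reverse) = [] := by
        rw [htfull]
        simp [List.takeWhile_append]
        decide
      simp [h4]
    have hRnil : List.dropWhile PySem.Chars.isspace cs.reverse ≠ [] := by
      intro hx
      have := congrArg List.length (List.takeWhile_append_dropWhile
        (p := PySem.Chars.isspace) (l := cs.reverse))
      rw [hx] at this
      simp [htwr] at this
      omega
    have hrev : pvScanRev cs.length cs.reverse 0 = ((la.length + t.length : Nat) : Int) - 1 := by
      rw [pvScanRev_eq, if_neg hRnil, htwr]
      push_cast [hlen]
      ring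
    have hget1 : PySem.List.pyGetD cs ((la.length : Nat) : Int) ' ' = '[' := by
      rw [PySem.List.pyGetD_natCast, hcs2, List.append_assoc]
      rw [List.getD_eq_getElem?_getD, List.getElem?_append_right (le_refl _)]
      simp only [Nat.sub_self]
      rw [← List.head?_eq_getElem?, List.head?_append_of_ne_nil _ ht]
      rw [hhead]; rfl
    have hcast2 : ((la.length + t.length : Nat) : Int) - 1 =
        ((la.length + t.length - 1 : Nat) : Int) := by
      have : 1 ≤ t.length := by omega
      omega
    have hget2 : PySem.List.pyGetD cs (((la.length + t.length : Nat) : Int) - 1) ' ' = ']' := by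
      rw [hcast2, PySem.List.pyGetD_natCast]
      have hcs3 : cs = (la ++ t) ++ tr := by rw [hcs2]
      rw [hcs3, List.getD_eq_getElem?_getD]
      rw [List.getElem?_append_left (by simp; omega)]
      have : (la ++ t)[la.length + t.length - 1]? = (la ++ t).getLast? := by
        rw [List.getLast?_eq_getElem?]; simp
      rw [this, List.getLast?_append_of_ne_nil la ht, hlast]; rfl
    have hslice : PySem.List.slice cs (some (((la.length : Nat) : Int) + 1))
        (some (((la.length + t.length : Nat) : Int) - 1)) = mid := by
      rw [hcast2]
      have h1 : (((la.length : Nat) : Int) + 1) = ((la.length + 1 : Nat) : Int) := by push_cast; ring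
      rw [h1, PySem.List.slice_natCast]
      rw [hcs2, List.append_assoc, List.drop_append]
      have hla1 : la.length + 1 - la.length = 1 := by omega
      rw [List.drop_eq_nil_of_le (by omega), hla1, List.nil_append]
      rw [htfull]
      simp only [List.cons_append, List.drop_one, List.tail_cons]
      have h7 : la.length + ('[' :: (mid ++ [']'])).length - 1 - (la.length + 1) = mid.length := by
        simp
        omega
      rw [h7, List.take_append]
      have h8 : mid.length - (mid ++ [']']).length = 0 := by simp
      rw [h8, List.take_zero, List.append_nil, List.take_append, Nat.sub_self,
        List.take_zero, List.append_nil, List.take_length]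
    -- ===== B side =====
    have hB : pvScanB cs 0 (-1, -1, 0) = pvScanB t la.length (-1, -1, 0) := by
      rw [hcs2, pvScanB_append, pvScanB_append,
        pvScanB_all_space la 0 _ hlaws,
        pvScanB_all_space tr _ _ htrws]
      simp
    have hBval : pvScanB t la.length (-1, -1, 0) =
        (((la.length : Nat) : Int), ((la.length + t.length : Nat) : Int) - 1,
          2 + (mid.filter (fun x => !PySem.Chars.isspace x)).length) := by
      rw [htfull]
      have hnb : PySem.Chars.isspace '[' = false := by decide
      have hne : PySem.Chars.isspace ']' = false := by decide
      simp only [pvScanB, hnb, Bool.not_false, if_true, if_pos (by decide : (-1 : Int) < 0)]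
      rw [pvScanB_append, pvScanB_singleton _ _ _ hne]
      have hfst := pvScanB_first_stable mid (la.length + 1) ((la.length : Nat) : Int)
        ((la.length : Nat) : Int) (0 + 1) (by positivity)
      have hcnt := pvScanB_count mid (la.length + 1)
        (((la.length : Nat) : Int), ((la.length : Nat) : Int), 0 + 1)
      rw [hfst, if_neg (by omega : ¬ ((la.length : Nat) : Int) < 0), hcnt]
      simp only [Prod.mk.injEq]
      refine ⟨trivial, ?_, ?_⟩
      · simp
        omega
      · omega
    have hitems : (!(PySem.Chars.strip mid).isEmpty) =
        decide (3 ≤ 2 + (mid.filter (fun x => !PySem.Chars.isspace x)).length) := by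
      by_cases hm : PySem.Chars.strip mid = []
      · have hall := (pv_all_space mid).mpr hm
        have : mid.filter (fun x => !PySem.Chars.isspace x) = [] := by
          rw [List.filter_eq_nil_iff]; intro x hx; simp [hall x hx]
        simp [hm, this]
      · have hex : ¬ ∀ x ∈ mid, PySem.Chars.isspace x = true :=
          fun h => hm ((pv_all_space mid).mp h)
        push_neg at hex
        obtain ⟨x, hx, hxs⟩ := hex
        have : mid.filter (fun x => !PySem.Chars.isspace x) ≠ [] := by
          rw [ne_eq, List.filter_eq_nil_iff]
          push_neg
          exact ⟨x, hx, by simpa using hxs⟩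
        have h1 : 1 ≤ (mid.filter (fun x => !PySem.Chars.isspace x)).length :=
          List.length_pos_iff.mpr this
        have h2 : 3 ≤ 2 + (mid.filter (fun x => !PySem.Chars.isspace x)).length := by omega
        simp [List.isEmpty_eq_false_iff.mpr hm, h2]
    -- ===== assemble =====
    simp only [hfwd, hrev, hB, hBval, hget1, hget2, hslice]
    rw [if_neg (by omega :
      ¬(((la.length : Nat) : Int) < 0 ∨ ((la.length + t.length : Nat) : Int) - 1 < 0))]
    rw [if_neg (by simp : ¬ ('[' ≠ '[' ∨ ']' ≠ ']'))]
    rw [if_neg (by omega : ¬ (2 + (mid.filter (fun x => !PySem.Chars.isspace x)).length = 0))]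
    rw [if_neg (by simp : ¬ ('[' ≠ '[' ∨ ']' ≠ ']'))]
    simp [hitems]
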